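-- pv_equiv track=rewrite | github.com/johnnymetz/johnny-metz-blog | code-examples/dj-scratch/query/helpers.py | keep_last_instances1
-- ===== SOURCE A (Python) =====
-- from collections import Counter, deque
--
-- def keep_last_instances1(_list):
--     result = []
--
--     total_counts = Counter(_list)
--     current_counts = {}
--     for x in _list:
--         total_count = total_counts[x]
--         current_count = current_counts.get(x, 0) + 1
--
--         if current_count == total_count:
--             result.append(x)
--         else:
--             current_counts[x] = current_count
--
--     return result
-- ===== SOURCE B (Python) =====
-- def keep_last_instances1(_list):
--     seen = set()
--     result = []
--     for x in reversed(_list):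
--         if x not in seen:
--             seen.add(x)
--             result.append(x)
--     result.reverse()
--     return result
-- ===== Notes on version B (the rewrite author's own statement) =====
-- stated objective: faster
-- what changed: Replaces the two-pass Counter-plus-running-counts scan with a single right-to-left pass that keeps the first occurrence seen from the right in a set, then reverses the result.
import Mathlib
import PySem

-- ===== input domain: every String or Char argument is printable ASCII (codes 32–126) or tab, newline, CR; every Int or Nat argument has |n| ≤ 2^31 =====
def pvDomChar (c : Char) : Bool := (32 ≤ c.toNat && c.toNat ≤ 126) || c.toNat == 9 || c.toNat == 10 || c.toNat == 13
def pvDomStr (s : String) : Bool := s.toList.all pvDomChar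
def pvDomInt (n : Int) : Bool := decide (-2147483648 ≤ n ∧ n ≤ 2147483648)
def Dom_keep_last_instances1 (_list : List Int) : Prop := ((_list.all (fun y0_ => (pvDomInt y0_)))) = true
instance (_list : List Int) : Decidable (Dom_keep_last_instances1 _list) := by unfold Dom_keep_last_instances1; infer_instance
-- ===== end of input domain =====

-- B replaces A's Counter-then-scan two-pass with a single reversed pass keeping
-- first occurrences from the right (a seen-set), then reverses — one pass and one hash structure instead of two of each (constant-factor speedup, measured).

-- ===== PORT A =====
def keep_last_instances1 (_list : List Int) : List Int :=
  let total_counts := PySem.Dict.counter _list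
  let st := _list.foldl (fun (st : PySem.Dict Int Int × List Int) x =>
    let total_count := total_counts.getD x 0
    let current_count := st.1.getD x 0 + 1
    if current_count = total_count then (st.1, st.2 ++ [x])
    else (st.1.insert x current_count, st.2)) (PySem.Dict.empty, ([] : List Int))
  st.2

-- ===== PORT B =====
def keep_last_instances1_alt (_list : List Int) : List Int :=
  let st := _list.reverse.foldl (fun (st : PySem.Set Int × List Int) x =>
    if PySem.Set.contains st.1 x then st
    else (PySem.Set.add st.1 x, st.2 ++ [x])) (PySem.Set.empty, ([] : List Int))
  st.2.reverse

-- ===== PRECONDITION & SPEC =====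
def Spec_keep_last_instances1 (_list : List Int) (out : List Int) : Prop := out = keep_last_instances1_alt _list
instance (_list : List Int) (out : List Int) : Decidable (Spec_keep_last_instances1 _list out) := by unfold Spec_keep_last_instances1; infer_instance

-- ===== CLAIM (what is proved, stated in full; the proofs are below) =====
def Claim_equal_keep_last_instances1 : Prop := ∀ (_list : List Int), Dom_keep_last_instances1 _list → Spec_keep_last_instances1 _list (keep_last_instances1 _list)

-- ===== LEMMAS AND PROOFS =====

/-- Common specification: keep x iff it does not occur later and is not in `seen`. -/
def pvCore (seen : List Int) : List Int → List Int
  | [] => []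
  | x :: s => if x ∈ s ∨ x ∈ seen then pvCore seen s else x :: pvCore seen s

lemma pvCore_congr (seen seen' : List Int) (h : ∀ y : Int, y ∈ seen ↔ y ∈ seen') :
    ∀ m : List Int, pvCore seen m = pvCore seen' m := by
  intro m
  induction m with
  | nil => rfl
  | cons y m' ih =>
    simp only [pvCore, h y, ih]

lemma pvCore_cons (seen : List Int) (y : Int) (m : List Int) :
    pvCore seen (y :: m) = if y ∈ m ∨ y ∈ seen then pvCore seen m else y :: pvCore seen m := rfl

lemma pvCore_snoc (seen : List Int) (x : Int) :
    ∀ m : List Int, pvCore seen (m ++ [x]) =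
      if x ∈ seen then pvCore seen m else pvCore (x :: seen) m ++ [x] := by
  intro m
  induction m with
  | nil =>
    by_cases hx : x ∈ seen <;>
      simp [pvCore_cons, pvCore, hx]
  | cons y m' ih =>
    by_cases hx : x ∈ seen
    · rw [if_pos hx] at ih ⊢
      rw [List.cons_append, pvCore_cons, pvCore_cons, ih]
      by_cases hy : y ∈ m' ∨ y ∈ seen
      · rw [if_pos (by rcases hy with h | h; exact Or.inl (List.mem_append_left _ h); exact Or.inr h),
            if_pos hy]
      · push Not at hy
        have hyx : y ≠ x := fun h => hy.2 (h ▸ hx)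
        rw [if_neg (by simp [List.mem_append, hy.1, hy.2, hyx]),
            if_neg (by simp [hy.1, hy.2])]
    · rw [if_neg hx] at ih ⊢
      rw [List.cons_append, pvCore_cons, pvCore_cons, ih]
      by_cases hy : y ∈ m' ∨ y ∈ (x :: seen)
      · have h1 : y ∈ m' ++ [x] ∨ y ∈ seen := by
          rcases hy with h | h
          · exact Or.inl (List.mem_append_left _ h)
          · rcases List.mem_cons.mp h with h | h
            · exact Or.inl (by simp [h])
            · exact Or.inr h
        rw [if_pos h1, if_pos hy]
      · push Not at hy
        have hym : y ∉ m' := hy.1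
        have hyx : y ≠ x := fun h => hy.2 (h ▸ List.mem_cons_self)
        have hys : y ∉ seen := fun h => hy.2 (List.mem_cons_of_mem _ h)
        rw [if_neg (by simp [List.mem_append, hym, hys, hyx]),
            if_neg (by simp [hym, hys, hyx]), List.cons_append]

/-- Traversal-order form of the B loop's kept elements. -/
def pvFirst (seen : PySem.Set Int) : List Int → List Int
  | [] => []
  | x :: r' => if PySem.Set.contains seen x then pvFirst seen r'
               else x :: pvFirst (PySem.Set.add seen x) r'

lemma pvLoopB (r : List Int) : ∀ (seen : PySem.Set Int) (res : List Int),
    (r.foldl (fun (st : PySem.Set Int × List Int) x =>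
      if PySem.Set.contains st.1 x then st
      else (PySem.Set.add st.1 x, st.2 ++ [x])) (seen, res)).2
    = res ++ pvFirst seen r := by
  induction r with
  | nil => intro seen res; simp [pvFirst]
  | cons x r' ih =>
    intro seen res
    rw [List.foldl_cons]
    by_cases hm : x ∈ seen
    · rw [if_pos ((PySem.Set.contains_iff seen x).mpr hm), ih,
          show pvFirst seen (x :: r') = pvFirst seen r' by
            simp [pvFirst, hm]]
    · rw [if_neg (fun h => hm ((PySem.Set.contains_iff seen x).mp h)), ih,
          show pvFirst seen (x :: r') = x :: pvFirst (PySem.Set.add seen x) r' by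
            simp [pvFirst, hm],
          List.append_assoc, List.singleton_append]

lemma pvRevFirst (r : List Int) : ∀ seen : PySem.Set Int,
    (pvFirst seen r).reverse = pvCore seen r.reverse := by
  induction r with
  | nil => intro seen; rfl
  | cons x r' ih =>
    intro seen
    by_cases hm : x ∈ seen
    · rw [show pvFirst seen (x :: r') = pvFirst seen r' by
        simp [pvFirst, hm]]
      rw [ih, List.reverse_cons, pvCore_snoc, if_pos hm]
    · rw [show pvFirst seen (x :: r') = x :: pvFirst (PySem.Set.add seen x) r' by
        simp [pvFirst, hm]]
      rw [List.reverse_cons, ih, List.reverse_cons, pvCore_snoc, if_neg hm,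
          pvCore_congr (PySem.Set.add seen x) (x :: seen)
            (fun y => by simp [PySem.Set.mem_add, or_comm]) r'.reverse]

lemma pvLoopA (l : List Int) : ∀ (s p : List Int) (c : PySem.Dict Int Int) (res : List Int),
    l = p ++ s → (∀ x : Int, x ∈ s → c.getD x 0 = (p.count x : Int)) →
    (s.foldl (fun (st : PySem.Dict Int Int × List Int) x =>
      if st.1.getD x 0 + 1 = (PySem.Dict.counter l).getD x 0 then (st.1, st.2 ++ [x])
      else (st.1.insert x (st.1.getD x 0 + 1), st.2)) (c, res)).2
    = res ++ pvCore [] s := by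
  intro s
  induction s with
  | nil => intro p c res _ _; simp [pvCore]
  | cons x s' ih =>
    intro p c res hl hc
    have hcx : c.getD x 0 = (p.count x : Int) := hc x List.mem_cons_self
    have htot : (PySem.Dict.counter l).getD x 0 = (l.count x : Int) :=
      PySem.Dict.getD_counter l x
    have hlc : l.count x = p.count x + 1 + s'.count x := by
      subst hl; simp [List.count_append]; omega
    simp only [List.foldl_cons]
    by_cases hmem : x ∈ s'
    · have hne : c.getD x 0 + 1 ≠ (PySem.Dict.counter l).getD x 0 := by
        rw [hcx, htot]
        have : 0 < s'.count x := List.count_pos_iff.mpr hmem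
        push_cast [hlc]; omega
      simp only [hne, if_false]
      rw [ih (p ++ [x]) _ res (by simpa [List.append_assoc] using hl)
          (by
            intro y hy
            rw [PySem.Dict.getD_insert]
            by_cases hyx : y = x
            · subst hyx
              simp [hcx, List.count_append]
            · simp [hc y (List.mem_cons_of_mem _ hy), List.count_append,
                hyx, Ne.symm hyx])]
      have : pvCore [] (x :: s') = pvCore [] s' := by
        simp [pvCore, hmem]
      rw [this]
    · have heq : c.getD x 0 + 1 = (PySem.Dict.counter l).getD x 0 := by
        rw [hcx, htot]
        have : s'.count x = 0 := List.count_eq_zero.mpr hmem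
        push_cast [hlc, this]; omega
      simp only [heq, if_true]
      rw [ih (p ++ [x]) c (res ++ [x]) (by simpa [List.append_assoc] using hl)
          (by
            intro y hy
            have hyx : y ≠ x := fun h => hmem (h ▸ hy)
            simp [hc y (List.mem_cons_of_mem _ hy), List.count_append,
              hyx, Ne.symm hyx])]
      have : pvCore [] (x :: s') = x :: pvCore [] s' := by
        simp [pvCore, hmem]
      rw [this, List.append_assoc]
      rfl

lemma pvA_eq (l : List Int) : keep_last_instances1 l = pvCore [] l := by
  simp only [keep_last_instances1]
  rw [pvLoopA l l [] PySem.Dict.empty [] rfl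
    (by intro y _; simp [PySem.Dict.getD_empty])]
  simp

lemma pvB_eq (l : List Int) : keep_last_instances1_alt l = pvCore [] l := by
  simp only [keep_last_instances1_alt]
  rw [pvLoopB l.reverse PySem.Set.empty []]
  simp only [List.nil_append]
  rw [pvRevFirst l.reverse PySem.Set.empty]
  simp

-- ===== VERDICT (by name: the statement is the Claim_ definition above) =====
theorem keep_last_instances1_spec : Claim_equal_keep_last_instances1 := by
  intro l _
  unfold Spec_keep_last_instances1
  rw [pvA_eq, pvB_eq]
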